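-- pv_equiv track=rewrite | github.com/AP-MI-2021/lab-3-CristiCH2002 | main.py | get_longest_all_perfect_squares
-- ===== SOURCE A (Python) =====
-- def patrat_perfect(n):
--     '''
--     Calculeaza daca n este patrat perfect
--     :param n: int,nr ul dat
--     :return: True/False
--     '''
--     for i in range(1,n+1):
--         if i*i==n:
--             return True
--     return False
--
-- def get_longest_all_perfect_squares(lst):
--     '''
--     Determina cea mai lunga subsecventa de patrate perfecte
--     :param lst: list,lista data
--     :return: list,subsecventa ceruta
--     '''
--     lmax=0
--     l=0
--     j=-1
--     for i,el in enumerate(lst):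
--         if patrat_perfect(el)== True:
--             l=l+1
--         else :
--             l=0
--         if lmax<l:
--             lmax=l
--             j=i
--     rez=[]
--     for i in range(j-lmax+1,j+1):
--         rez.append(lst[i])
--     return rez
-- ===== SOURCE B (Python) =====
-- def _is_perfect_square(n):
--     # smallest i >= 1 with i*i >= n, then test equality: O(sqrt(n)) instead of O(n)
--     i = 1
--     while i * i < n:
--         i += 1
--     return i * i == n
--
--
-- def get_longest_all_perfect_squares(lst):
--     '''
--     Determina cea mai lunga subsecventa de patrate perfecte
--     :param lst: list,lista data
--     :return: list,subsecventa ceruta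
--     '''
--     # phase 1: split the list into its maximal runs of perfect squares
--     runs = []
--     cur = []
--     for el in lst:
--         if _is_perfect_square(el):
--             cur.append(el)
--         else:
--             if cur:
--                 runs.append(cur)
--             cur = []
--     if cur:
--         runs.append(cur)
--     # phase 2: first strictly-longest run wins (empty if none)
--     best = []
--     for r in runs:
--         if len(best) < len(r):
--             best = r
--     return best
-- ===== Notes on version B (the rewrite author's own statement) =====
-- stated objective: faster
-- what changed: B tests perfect squares by advancing i only while i*i < n (O(sqrt n) per test instead of A's O(n) scan of range(1,n+1)), and replaces A's index bookkeeping (lmax/l/j plus a second indexing loop) by materialising the maximal runs of perfect squares and picking the first strictly-longest run.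
import Mathlib
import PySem

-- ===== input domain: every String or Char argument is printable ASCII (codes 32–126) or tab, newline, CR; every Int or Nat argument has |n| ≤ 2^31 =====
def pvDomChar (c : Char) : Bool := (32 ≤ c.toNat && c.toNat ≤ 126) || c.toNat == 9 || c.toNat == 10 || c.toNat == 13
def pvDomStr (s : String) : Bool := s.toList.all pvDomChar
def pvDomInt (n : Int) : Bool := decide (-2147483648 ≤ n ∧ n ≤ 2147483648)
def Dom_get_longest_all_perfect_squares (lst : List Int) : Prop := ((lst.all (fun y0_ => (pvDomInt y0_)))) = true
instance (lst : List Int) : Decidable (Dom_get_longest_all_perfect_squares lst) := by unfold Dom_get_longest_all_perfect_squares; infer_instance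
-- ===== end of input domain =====

-- B replaces A's O(n) perfect-square scan by an O(√n) search and A's lmax/l/j index
-- bookkeeping by "split into runs, pick the first longest" (objective: faster per-element test).

-- ===== PORT A =====
-- A's helper: for i in range(1, n+1): if i*i==n: return True; return False
-- (the early-returning for-loop is exactly an existence test over the range)
def patrat_perfect (n : Int) : Bool :=
  (PySem.List.pyRange 1 (n + 1) 1).any (fun i => i * i == n)

-- state (lmax, l, j); second loop indexes lst with always-in-range indices, so pyGetD is exact there
def get_longest_all_perfect_squares (lst : List Int) : List Int :=
  let st := (PySem.List.enumerate lst).foldl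
    (fun (st : Int × Int × Int) (pr : Int × Int) =>
      let l := if patrat_perfect pr.2 then st.2.1 + 1 else 0
      if st.1 < l then (l, l, pr.1) else (st.1, l, st.2.2))
    (0, 0, -1)
  (PySem.List.pyRange (st.2.2 - st.1 + 1) (st.2.2 + 1) 1).foldl
    (fun rez i => rez ++ [PySem.List.pyGetD lst i 0]) []

-- ===== PORT B =====
-- Source B's helper: i = 1; while i*i < n: i += 1; return i*i == n
def pvIsqLoop (n : Int) (i : Nat) : Nat :=
  if (i : Int) * i < n then pvIsqLoop n (i + 1) else i
termination_by n.toNat - i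
decreasing_by
  have h1 : (i : Int) ≤ (i : Int) * i := by
    rcases Nat.eq_zero_or_pos i with h | h
    · simp [h]
    · have : (1 : Int) ≤ (i : Int) := by exact_mod_cast h
      nlinarith
  omega

def patrat_perfect_alt (n : Int) : Bool :=
  let i := pvIsqLoop n 1
  ((i : Int) * i == n)

-- state (runs, cur); then flush cur, then first strictly-longest run
def get_longest_all_perfect_squares_alt (lst : List Int) : List Int :=
  let st := lst.foldl
    (fun (st : List (List Int) × List Int) el =>
      if patrat_perfect_alt el then (st.1, st.2 ++ [el])
      else if st.2 ≠ [] then (st.1 ++ [st.2], ([] : List Int)) else (st.1, ([] : List Int)))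
    ([], [])
  let runs := if st.2 ≠ [] then st.1 ++ [st.2] else st.1
  runs.foldl (fun best r => if best.length < r.length then r else best) []

-- ===== PRECONDITION & SPEC =====
def Spec_get_longest_all_perfect_squares (lst : List Int) (out : List Int) : Prop := out = get_longest_all_perfect_squares_alt lst
instance (lst : List Int) (out : List Int) : Decidable (Spec_get_longest_all_perfect_squares lst out) := by unfold Spec_get_longest_all_perfect_squares; infer_instance

-- ===== CLAIM (what is proved, stated in full; the proofs are below) =====
def Claim_equal_get_longest_all_perfect_squares : Prop := ∀ (lst : List Int), Dom_get_longest_all_perfect_squares lst → Spec_get_longest_all_perfect_squares lst (get_longest_all_perfect_squares lst)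

-- ===== LEMMAS AND PROOFS =====

-- the two perfect-square tests agree
lemma patrat_iff (n : Int) :
    patrat_perfect n = true ↔ ∃ i : Int, 1 ≤ i ∧ i < n + 1 ∧ i * i = n := by
  simp [patrat_perfect, List.any_eq_true, PySem.List.mem_pyRange_one]
  constructor
  · rintro ⟨i, ⟨h1, h2⟩, h3⟩; exact ⟨i, h1, h2, h3⟩
  · rintro ⟨i, h1, h2, h3⟩; exact ⟨i, ⟨h1, h2⟩, h3⟩

lemma pvIsqLoop_ge (n : Int) (i : Nat) : i ≤ pvIsqLoop n i := by
  fun_induction pvIsqLoop n i with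
  | case1 i h ih => omega
  | case2 i h => omega

lemma pvIsqLoop_big (n : Int) (i : Nat) :
    n ≤ (pvIsqLoop n i : Int) * (pvIsqLoop n i) := by
  fun_induction pvIsqLoop n i with
  | case1 i h ih => exact ih
  | case2 i h => omega

lemma pvIsqLoop_min (n : Int) (i : Nat) :
    ∀ k : Nat, i ≤ k → k < pvIsqLoop n i → (k : Int) * k < n := by
  fun_induction pvIsqLoop n i with
  | case1 i h ih =>
      intro k hk hk2
      rcases Nat.eq_or_lt_of_le hk with rfl | h'
      · exact h
      · exact ih k h' hk2
  | case2 i h => intro k hk hk2; omega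

lemma sq_eq (n : Int) : patrat_perfect_alt n = patrat_perfect n := by
  rw [Bool.eq_iff_iff]
  rw [patrat_iff]
  simp only [patrat_perfect_alt, beq_iff_eq]
  constructor
  · intro h
    refine ⟨(pvIsqLoop n 1 : Int), ?_, ?_, h⟩
    · exact_mod_cast pvIsqLoop_ge n 1
    · nlinarith [pvIsqLoop_ge n 1, h, Int.natCast_nonneg (pvIsqLoop n 1)]
  · rintro ⟨w, hw1, hw2, hw3⟩
    set r := pvIsqLoop n 1 with hr
    have hrge : (1 : Nat) ≤ r := pvIsqLoop_ge n 1
    have hbig : n ≤ (r : Int) * r := pvIsqLoop_big n 1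
    -- r ≤ w: otherwise w < r and w*w < n, contradicting w*w = n
    have hwnat : w = ((w.toNat : Int)) := by omega
    have hrw : (r : Int) ≤ w := by
      by_contra hcon
      rw [Int.not_le] at hcon
      have hlt : w.toNat < r := by omega
      have := pvIsqLoop_min n 1 w.toNat (by omega) hlt
      rw [← hwnat] at this
      omega
    have : (r : Int) * r ≤ w * w := by nlinarith [Int.natCast_nonneg r]
    omega

-- ---- abbreviations equal (definitionally) to the fold bodies of the two ports ----
def pvStepA (st : Int × Int × Int) (pr : Int × Int) : Int × Int × Int :=
  let l := if patrat_perfect pr.2 then st.2.1 + 1 else 0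
  if st.1 < l then (l, l, pr.1) else (st.1, l, st.2.2)

def pvStepB (st : List (List Int) × List Int) (el : Int) : List (List Int) × List Int :=
  if patrat_perfect_alt el then (st.1, st.2 ++ [el])
  else if st.2 ≠ [] then (st.1 ++ [st.2], ([] : List Int)) else (st.1, ([] : List Int))

def pvBStep (best r : List Int) : List Int := if best.length < r.length then r else best

def pvBestOf (rs : List (List Int)) : List Int := rs.foldl pvBStep []

def pvBFinal (runs : List (List Int)) (cur : List Int) : List Int :=
  pvBestOf (if cur ≠ [] then runs ++ [cur] else runs)

def pvASlice (p : List Int) (lmax j : Int) : List Int :=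
  (p.drop (j - lmax + 1).toNat).take lmax.toNat

lemma portA_eq (lst : List Int) :
    get_longest_all_perfect_squares lst =
      (let st := (PySem.List.enumerate lst).foldl pvStepA (0, 0, -1)
       (PySem.List.pyRange (st.2.2 - st.1 + 1) (st.2.2 + 1) 1).foldl
         (fun rez i => rez ++ [PySem.List.pyGetD lst i 0]) []) := rfl

lemma portB_eq (lst : List Int) :
    get_longest_all_perfect_squares_alt lst =
      (let st := lst.foldl pvStepB ([], [])
       pvBFinal st.1 st.2) := rfl

lemma pvBStep_len_left (b r : List Int) : b.length ≤ (pvBStep b r).length := by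
  unfold pvBStep; split_ifs with h <;> omega

lemma pvBestOf_append (rs : List (List Int)) (c : List Int) :
    pvBestOf (rs ++ [c]) = pvBStep (pvBestOf rs) c := by
  simp [pvBestOf, List.foldl_append]

lemma pvBestOf_le_final (runs : List (List Int)) (cur : List Int) :
    (pvBestOf runs).length ≤ (pvBFinal runs cur).length := by
  unfold pvBFinal
  split_ifs with h
  · rw [pvBestOf_append]; exact pvBStep_len_left _ _
  · omega

-- a bounded slice of a prefix is unchanged by extending the list
lemma pvASlice_prefix (p : List Int) (el : Int) (lmax j : Int)
    (h0 : 0 ≤ lmax) (h1 : lmax ≤ j + 1) (h2 : j + 1 ≤ (p.length : Int)) :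
    pvASlice (p ++ [el]) lmax j = pvASlice p lmax j := by
  unfold pvASlice
  rw [List.drop_append_of_le_length (by omega)]
  rw [List.take_append_of_le_length (by simp; omega)]

-- the slice picking the last (cur.length + 1) elements of p ++ [el], where p = q ++ cur
lemma pvASlice_tail (q cur : List Int) (el : Int) :
    pvASlice ((q ++ cur) ++ [el]) ((cur.length : Int) + 1) ((q ++ cur).length : Int)
      = cur ++ [el] := by
  unfold pvASlice
  have ha : (((q ++ cur).length : Int) - ((cur.length : Int) + 1) + 1).toNat = q.length := by
    simp; omega
  rw [ha]
  have h2 : (q ++ cur) ++ [el] = q ++ (cur ++ [el]) := by simp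
  rw [h2, List.drop_append_of_le_length (by omega), List.drop_length]
  have h3 : (((cur.length : Int) + 1)).toNat = cur.length + 1 := by omega
  rw [h3]
  simp

-- the final indexing loop of A computes exactly the drop/take slice
lemma pvExtract_eq (xs : List Int) (a b : Int) (h0 : 0 ≤ a) (hb : b ≤ (xs.length : Int)) :
    (PySem.List.pyRange a b 1).foldl (fun rez i => rez ++ [PySem.List.pyGetD xs i 0]) []
      = (xs.drop a.toNat).take (b - a).toNat := by
  rw [PySem.List.foldl_append_singleton_eq_map]
  rcases le_or_gt b a with h | h
  · rw [PySem.List.pyRange_one_eq_nil h]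
    have : (b - a).toNat = 0 := by omega
    simp [this]
  · have hsplit := PySem.List.pyRange_one_append a b (xs.length : Int) (le_of_lt h) hb
    have hfull := PySem.List.foldl_pyRange_pyGetD' (xs := xs) (a := a) (d := 0)
      (f := fun (acc : List Int) (x : Int) => acc ++ [x]) (init := ([] : List Int)) h0
    -- turn both foldl-append forms into maps
    rw [PySem.List.foldl_append_singleton_eq_self] at hfull
    have hb0 : 0 ≤ b := by omega
    have hfull2 := PySem.List.foldl_pyRange_pyGetD' (xs := xs) (a := b) (d := 0)
      (f := fun (acc : List Int) (x : Int) => acc ++ [x]) (init := ([] : List Int)) hb0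
    rw [PySem.List.foldl_append_singleton_eq_self] at hfull2
    have hmapfull : (PySem.List.pyRange a (xs.length : Int) 1).map (fun i => PySem.List.pyGetD xs i 0) = xs.drop a.toNat := by
      have := hfull
      rw [show (PySem.List.pyRange a (xs.length : Int) 1).foldl (fun acc j => (fun (acc : List Int) (x : Int) => acc ++ [x]) acc (PySem.List.pyGetD xs j 0)) [] = (PySem.List.pyRange a (xs.length : Int) 1).foldl (fun acc j => acc ++ [PySem.List.pyGetD xs j 0]) [] from rfl] at this
      rw [PySem.List.foldl_append_singleton_eq_map] at this
      simpa using this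
    have hmapb : (PySem.List.pyRange b (xs.length : Int) 1).map (fun i => PySem.List.pyGetD xs i 0) = xs.drop b.toNat := by
      have := hfull2
      rw [show (PySem.List.pyRange b (xs.length : Int) 1).foldl (fun acc j => (fun (acc : List Int) (x : Int) => acc ++ [x]) acc (PySem.List.pyGetD xs j 0)) [] = (PySem.List.pyRange b (xs.length : Int) 1).foldl (fun acc j => acc ++ [PySem.List.pyGetD xs j 0]) [] from rfl] at this
      rw [PySem.List.foldl_append_singleton_eq_map] at this
      simpa using this
    rw [hsplit, List.map_append, hmapb] at hmapfull
    -- hmapfull : mapab ++ xs.drop b.toNat = xs.drop a.toNat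
    have hlen : ((PySem.List.pyRange a b 1).map (fun i => PySem.List.pyGetD xs i 0)).length = (b - a).toNat := by
      simp [PySem.List.length_pyRange_one]
    calc (PySem.List.pyRange a b 1).map (fun i => PySem.List.pyGetD xs i 0)
        = (((PySem.List.pyRange a b 1).map (fun i => PySem.List.pyGetD xs i 0)) ++ xs.drop b.toNat).take (b - a).toNat := by
          rw [List.take_append_of_le_length (by omega), List.take_of_length_le (by omega)]
      _ = (xs.drop a.toNat).take (b - a).toNat := by rw [hmapfull]

-- the main loop invariant: processing the remaining suffix from related states gives equal results
lemma pv_loop (lst : List Int) (rest : List Int) :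
    ∀ (p : List Int) (s lmax l j : Int) (runs : List (List Int)) (cur : List Int),
    p ++ rest = lst →
    s = (p.length : Int) →
    l = (cur.length : Int) →
    (∃ q, p = q ++ cur) →
    0 ≤ lmax → lmax ≤ j + 1 → j + 1 ≤ (p.length : Int) →
    lmax = ((pvBFinal runs cur).length : Int) →
    pvBFinal runs cur = pvASlice p lmax j →
    (let stA := (PySem.List.enumerate rest s).foldl pvStepA (lmax, l, j)
     let stB := rest.foldl pvStepB (runs, cur)
     pvBFinal stB.1 stB.2 = pvASlice lst stA.1 stA.2.2 ∧
     0 ≤ stA.1 ∧ stA.1 ≤ stA.2.2 + 1 ∧ stA.2.2 + 1 ≤ (lst.length : Int)) := by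
  induction rest with
  | nil =>
      intro p s lmax l j runs cur hp hs hl hsuf h0 h1 h2 hlen heq
      simp only [PySem.List.enumerate_nil, List.foldl_nil]
      refine ⟨?_, h0, h1, ?_⟩
      · rw [heq]; simp [← hp]
      · rw [← hp]; simpa using h2
  | cons el rest ih =>
      intro p s lmax l j runs cur hp hs hl hsuf h0 h1 h2 hlen heq
      rw [PySem.List.enumerate_cons, List.foldl_cons, List.foldl_cons]
      obtain ⟨q, hq⟩ := hsuf
      have hcurlen : (cur.length : Int) ≤ (p.length : Int) := by
        rw [hq]; simp
      by_cases hsq : patrat_perfect el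
      · -- square: cur grows; A may update (lmax, j)
        have hsq' : patrat_perfect_alt el = true := by rw [sq_eq]; exact hsq
        simp only [pvStepA, pvStepB, hsq, hsq', if_true, hl]
        by_cases hup : lmax < (cur.length : Int) + 1
        · -- A updates: new best is cur ++ [el]
          rw [if_pos hup]
          subst hs
          apply ih (p ++ [el]) ((p.length : Int) + 1) ((cur.length : Int) + 1) ((cur.length : Int) + 1)
            (p.length : Int) runs (cur ++ [el])
          · simpa using hp
          · simp
          · simp
          · exact ⟨q, by rw [hq]; simp⟩
          · omega
          · omega
          · simp
          · -- new lmax = length of new best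
            have hle : (pvBestOf runs).length ≤ cur.length := by
              have := pvBestOf_le_final runs cur
              omega
            unfold pvBFinal
            rw [if_pos (by simp), pvBestOf_append]
            unfold pvBStep
            rw [if_pos (by simp; omega)]
            simp
          · -- new best = slice of the extended prefix
            have hle : (pvBestOf runs).length ≤ cur.length := by
              have := pvBestOf_le_final runs cur
              omega
            unfold pvBFinal
            rw [if_pos (by simp), pvBestOf_append]
            unfold pvBStep
            rw [if_pos (by simp; omega)]
            rw [hq]
            exact (pvASlice_tail q cur el).symm
        · -- A keeps (lmax, j); B's best is unchanged too
          rw [if_neg hup]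
          have hkeep : pvBFinal runs (cur ++ [el]) = pvBFinal runs cur := by
            have hL : pvBFinal runs (cur ++ [el]) = pvBStep (pvBestOf runs) (cur ++ [el]) := by
              unfold pvBFinal; rw [if_pos (by simp), pvBestOf_append]
            by_cases hc : cur = []
            · subst hc
              have hR : pvBFinal runs ([] : List Int) = pvBestOf runs := by
                unfold pvBFinal; simp
              rw [hR] at hlen
              rw [hL, hR]
              unfold pvBStep
              have hlen1 : (([] : List Int) ++ [el]).length = 1 := rfl
              rw [if_neg (by rw [hlen1]; simp at hup; omega)]
            · have hR : pvBFinal runs cur = pvBStep (pvBestOf runs) cur := by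
                unfold pvBFinal; rw [if_pos (by simpa using hc), pvBestOf_append]
              have hbig : cur.length < (pvBStep (pvBestOf runs) cur).length := by
                rw [← hR]; omega
              have hbo : pvBStep (pvBestOf runs) cur = pvBestOf runs := by
                by_cases hcc : (pvBestOf runs).length < cur.length
                · exfalso
                  unfold pvBStep at hbig
                  rw [if_pos hcc] at hbig
                  omega
                · unfold pvBStep
                  rw [if_neg hcc]
              rw [hL, hR, hbo]
              unfold pvBStep
              rw [if_neg (by rw [hbo] at hbig; simp; omega)]
          subst hs
          apply ih (p ++ [el]) ((p.length : Int) + 1) lmax ((cur.length : Int) + 1) j runs (cur ++ [el])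
          · simpa using hp
          · simp
          · simp
          · exact ⟨q, by rw [hq]; simp⟩
          · omega
          · omega
          · simp; omega
          · rw [hkeep]; omega
          · rw [hkeep, heq, pvASlice_prefix p el lmax j h0 h1 h2]
      · -- not a square: cur resets; A keeps (lmax, j) since lmax ≥ 0
        have hsqf : patrat_perfect el = false := by simpa using hsq
        have hsq' : patrat_perfect_alt el = false := by rw [sq_eq]; exact hsqf
        simp only [pvStepA, pvStepB, hsqf, hsq', if_false, Bool.false_eq_true]
        rw [show (if lmax < (0 : Int) then ((0 : Int), (0 : Int), s) else (lmax, (0 : Int), j)) = (lmax, 0, j) from if_neg (by omega)]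
        by_cases hc : cur = []
        · rw [if_neg (show ¬ (cur ≠ []) from by simp [hc])]
          subst hs
          apply ih (p ++ [el]) ((p.length : Int) + 1) lmax 0 j runs ([] : List Int)
          · simpa using hp
          · simp
          · simp
          · exact ⟨p ++ [el], by simp⟩
          · omega
          · omega
          · simp; omega
          · rw [show pvBFinal runs ([] : List Int) = pvBFinal runs cur from by rw [hc]]; omega
          · rw [show pvBFinal runs ([] : List Int) = pvBFinal runs cur from by rw [hc]]
            rw [heq, pvASlice_prefix p el lmax j h0 h1 h2]
        · rw [if_pos (show cur ≠ [] from hc)]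
          subst hs
          apply ih (p ++ [el]) ((p.length : Int) + 1) lmax 0 j (runs ++ [cur]) ([] : List Int)
          · simpa using hp
          · simp
          · simp
          · exact ⟨p ++ [el], by simp⟩
          · omega
          · omega
          · simp; omega
          · rw [show pvBFinal (runs ++ [cur]) ([] : List Int) = pvBFinal runs cur from by
              unfold pvBFinal; simp [hc]]
            omega
          · rw [show pvBFinal (runs ++ [cur]) ([] : List Int) = pvBFinal runs cur from by
              unfold pvBFinal; simp [hc]]
            rw [heq, pvASlice_prefix p el lmax j h0 h1 h2]

-- ===== VERDICT (by name: the statement is the Claim_ definition above) =====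
theorem get_longest_all_perfect_squares_spec : Claim_equal_get_longest_all_perfect_squares := by
  intro lst _
  unfold Spec_get_longest_all_perfect_squares
  rw [portA_eq, portB_eq]
  have h := pv_loop lst lst [] 0 0 0 (-1) [] []
    (by simp) (by simp) (by simp) ⟨[], rfl⟩ (by omega) (by omega) (by simp)
    (by simp [pvBFinal, pvBestOf]) (by simp [pvBFinal, pvBestOf, pvASlice])
  simp only at h
  obtain ⟨heq, h0, h1, h2⟩ := h
  set stA := (PySem.List.enumerate lst ((0 : Int))).foldl pvStepA (0, 0, -1) with hstA
  set stB := lst.foldl pvStepB ([], []) with hstB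
  rw [pvExtract_eq lst (stA.2.2 - stA.1 + 1) (stA.2.2 + 1) (by omega) (by omega)]
  have hA : (List.drop (stA.2.2 - stA.1 + 1).toNat lst).take (stA.2.2 + 1 - (stA.2.2 - stA.1 + 1)).toNat
      = pvASlice lst stA.1 stA.2.2 := by
    unfold pvASlice
    congr 1
    omega
  rw [hA]
  exact heq.symm
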